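-- pv_equiv track=rewrite | github.com/Igalem/myPy | airflow/glue_catalog_partition_cleanup/glue_catalog_partition_cleanup_dag.py | extract_partition_date
-- ===== SOURCE A (Python) =====
-- from typing import List, Dict, Any
--
-- def extract_partition_date(partition_keys: List[Dict], partition_values: List[str]) -> str:
--     """
--     Extract date string from partition values based on partition key structure.
--     """
--     partition_date = ''
--
--     # Check if partition keys contain year, month, and day
--     for i, key_info in enumerate(partition_keys):
--         key_name = key_info['Name']
--
--         if i < len(partition_values):
--             value = partition_values[i]
--
--             if key_name == 'year':
--                 partition_date += f'{value}'
--             elif key_name in ['month', 'day', 'hour', 'minute', 'second']: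
--                 partition_date += f'-{value.zfill(2)}'  # Pad with zero if needed
--             elif key_name in ['date', 'dt', 'partition_date', 'impression_date']:  # Other common date partition names
--                 partition_date = value
--                 break
--
--     return partition_date
-- ===== SOURCE B (Python) =====
-- DATE_NAMES = {'date', 'dt', 'partition_date', 'impression_date'}
--
--
-- def extract_partition_date(partition_keys, partition_values):
--     # Pass 1: a full-date partition key overrides everything.
--     for key_info, value in zip(partition_keys, partition_values):
--         if key_info['Name'] in DATE_NAMES:
--             return value
--     # Pass 2: assemble the date from the components.
--     parts = []
--     for key_info, value in zip(partition_keys, partition_values):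
--         name = key_info['Name']
--         if name == 'year':
--             parts.append(value)
--         elif name in ('month', 'day', 'hour', 'minute', 'second'):
--             parts.append('-' + value.zfill(2))
--     return ''.join(parts)
-- ===== Notes on version B (the rewrite author's own statement) =====
-- stated objective: simpler
-- what changed: Replaces the fused reset+break loop over enumerate with two zip passes: first find a full-date key and return its value directly, otherwise assemble the components into a list joined at the end.
import Mathlib
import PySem

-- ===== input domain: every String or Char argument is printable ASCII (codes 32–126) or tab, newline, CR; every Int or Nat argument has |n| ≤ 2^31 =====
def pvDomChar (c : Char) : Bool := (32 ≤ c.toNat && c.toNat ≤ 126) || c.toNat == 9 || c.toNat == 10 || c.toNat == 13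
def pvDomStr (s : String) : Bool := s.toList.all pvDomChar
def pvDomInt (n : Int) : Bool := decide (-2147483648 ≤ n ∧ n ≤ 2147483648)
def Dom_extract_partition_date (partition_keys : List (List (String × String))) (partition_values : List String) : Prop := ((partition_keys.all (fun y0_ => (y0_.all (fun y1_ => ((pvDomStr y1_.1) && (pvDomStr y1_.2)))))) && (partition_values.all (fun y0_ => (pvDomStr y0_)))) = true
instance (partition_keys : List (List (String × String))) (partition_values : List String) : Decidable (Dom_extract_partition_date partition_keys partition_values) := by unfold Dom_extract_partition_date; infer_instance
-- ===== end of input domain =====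

-- B splits A's fused reset+break loop into two zip passes (date-override search, then component assembly); equally fast, simpler decomposition.


-- ===== PORT A =====
-- value.zfill(2): exact for width 2 (Python keeps a leading sign character in place)
def pvZfill2 (s : String) : String :=
  match s.toList with
  | [] => "00"
  | [c] => if c = '+' ∨ c = '-' then String.ofList [c, '0'] else String.ofList ['0', c]
  | _ => s

-- A's single loop over enumerate(partition_keys) with the reset+break on a date name.
-- key_info['Name'] is ported as Dict.get? … |>.getD ""; Pre_ excludes the KeyError (none) case.
def pvA_loop (vs : List String) : List (List (String × String)) → Nat → String → String
  | [], _, acc => acc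
  | k :: ks, i, acc =>
    let name := (PySem.Dict.get? (PySem.Dict.mk k) "Name").getD ""
    if i < vs.length then
      let v := vs.getD i ""
      if name = "year" then
        pvA_loop vs ks (i+1) (acc ++ v)
      else if name = "month" ∨ name = "day" ∨ name = "hour" ∨ name = "minute" ∨ name = "second" then
        pvA_loop vs ks (i+1) (acc ++ "-" ++ pvZfill2 v)
      else if name = "date" ∨ name = "dt" ∨ name = "partition_date" ∨ name = "impression_date" then
        v
      else
        pvA_loop vs ks (i+1) acc
    else
      pvA_loop vs ks (i+1) acc

def extract_partition_date (partition_keys : List (List (String × String))) (partition_values : List String) : String :=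
  pvA_loop partition_values partition_keys 0 ""

-- ===== PORT B =====
-- pass 1 of Source B: first value whose key's Name is a full-date name
def pvB_find : List ((List (String × String)) × String) → Option String
  | [] => none
  | (k, v) :: rest =>
    let name := (PySem.Dict.get? (PySem.Dict.mk k) "Name").getD ""
    if name = "date" ∨ name = "dt" ∨ name = "partition_date" ∨ name = "impression_date" then some v
    else pvB_find rest

-- pass 2 of Source B: the list of component parts
def pvB_parts : List ((List (String × String)) × String) → List String
  | [] => []
  | (k, v) :: rest =>
    let name := (PySem.Dict.get? (PySem.Dict.mk k) "Name").getD ""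
    if name = "year" then v :: pvB_parts rest
    else if name = "month" ∨ name = "day" ∨ name = "hour" ∨ name = "minute" ∨ name = "second" then
      ("-" ++ pvZfill2 v) :: pvB_parts rest
    else pvB_parts rest

def extract_partition_date_alt (partition_keys : List (List (String × String))) (partition_values : List String) : String :=
  let z := partition_keys.zip partition_values
  match pvB_find z with
  | some v => v
  | none => String.join (pvB_parts z)

-- ===== PRECONDITION & SPEC =====
-- Pre_ excludes exactly the inputs on which Python A raises KeyError: some partition-key dict
-- lacks the key "Name" and is reached by A's loop, i.e. no earlier in-range full-date key
-- ('date'/'dt'/'partition_date'/'impression_date') triggers the break before it.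
def Pre_extract_partition_date (partition_keys : List (List (String × String))) (partition_values : List String) : Prop :=
  ∀ i < partition_keys.length,
    (PySem.Dict.get? (PySem.Dict.mk (partition_keys.getD i [])) "Name") = none →
    ∃ j < i, j < partition_values.length ∧
      (((PySem.Dict.get? (PySem.Dict.mk (partition_keys.getD j [])) "Name").getD "" = "date") ∨
       ((PySem.Dict.get? (PySem.Dict.mk (partition_keys.getD j [])) "Name").getD "" = "dt") ∨
       ((PySem.Dict.get? (PySem.Dict.mk (partition_keys.getD j [])) "Name").getD "" = "partition_date") ∨
       ((PySem.Dict.get? (PySem.Dict.mk (partition_keys.getD j [])) "Name").getD "" = "impression_date"))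
instance (partition_keys : List (List (String × String))) (partition_values : List String) : Decidable (Pre_extract_partition_date partition_keys partition_values) := by unfold Pre_extract_partition_date; infer_instance

def pvWitness_extract_partition_date : (List (List (String × String))) × List String :=
  ([[("Name", "year")], [("Name", "month")]], ["2024", "7"])

def Spec_extract_partition_date (partition_keys : List (List (String × String))) (partition_values : List String) (out : String) : Prop := out = extract_partition_date_alt partition_keys partition_values
instance (partition_keys : List (List (String × String))) (partition_values : List String) (out : String) : Decidable (Spec_extract_partition_date partition_keys partition_values out) := by unfold Spec_extract_partition_date; infer_instance

-- ===== CLAIM (what is proved, stated in full; the proofs are below) =====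
def Claim_equal_extract_partition_date : Prop := ∀ (partition_keys : List (List (String × String))) (partition_values : List String), Dom_extract_partition_date partition_keys partition_values → Pre_extract_partition_date partition_keys partition_values → Spec_extract_partition_date partition_keys partition_values (extract_partition_date partition_keys partition_values)

-- ===== LEMMAS AND PROOFS =====

theorem pvFoldl_append (a : String) (l : List String) :
    List.foldl (fun r s => r ++ s) a l = a ++ List.foldl (fun r s => r ++ s) "" l := by
  induction l generalizing a with
  | nil => simp
  | cons x xs ih =>
    simp only [List.foldl_cons]
    rw [ih (a ++ x), ih ("" ++ x)]
    simp [String.append_assoc]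

theorem pvA_loop_eq (ks : List (List (String × String))) (vs : List String) (i : Nat) (acc : String) :
    pvA_loop vs ks i acc =
      match pvB_find (ks.zip (vs.drop i)) with
      | some v => v
      | none => acc ++ String.join (pvB_parts (ks.zip (vs.drop i))) := by
  induction ks generalizing i acc with
  | nil => simp [pvA_loop, pvB_find, pvB_parts, String.join]
  | cons k ks ih =>
    rcases h : vs.drop i with _ | ⟨v, tail⟩
    · have hge : vs.length ≤ i := List.drop_eq_nil_iff.mp h
      have h' : vs.drop (i+1) = [] := List.drop_eq_nil_iff.mpr (by omega)
      simp only [pvA_loop, List.zip_nil_right, pvB_find, pvB_parts]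
      rw [if_neg (by omega), ih, h']
      simp [pvB_find, pvB_parts, String.join]
    · have hlt : i < vs.length := by
        by_contra hge
        rw [List.drop_eq_nil_iff.mpr (by omega)] at h; exact absurd h (by simp)
      have hv : vs.getD i "" = v := by
        have h0 : (vs.drop i)[0]? = some v := by rw [h]; rfl
        rw [List.getElem?_drop] at h0
        simp only [Nat.add_zero] at h0
        simp [List.getD, h0]
      have htail : vs.drop (i+1) = tail := by
        have hdd : (vs.drop i).drop 1 = vs.drop (i + 1) := by rw [List.drop_drop]
        rw [h] at hdd; simpa using hdd.symm
      simp only [pvA_loop, List.zip_cons_cons, pvB_find, pvB_parts]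
      rw [if_pos hlt, hv]
      set name := (PySem.Dict.get? (PySem.Dict.mk k) "Name").getD "" with hname
      by_cases hy : name = "year"
      · have hd : ¬ (name = "date" ∨ name = "dt" ∨ name = "partition_date" ∨ name = "impression_date") := by
          rw [hy]; decide
        rw [if_pos hy, if_neg hd, if_pos hy, ih, htail]
        cases pvB_find (ks.zip tail) with
        | some w => rfl
        | none =>
          simp only [String.join, List.foldl_cons]
          rw [pvFoldl_append]
          simp [String.append_assoc]
          try (conv_rhs => rw [pvFoldl_append])
          try simp [String.append_assoc]
      · by_cases hm : name = "month" ∨ name = "day" ∨ name = "hour" ∨ name = "minute" ∨ name = "second"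
        · have hd : ¬ (name = "date" ∨ name = "dt" ∨ name = "partition_date" ∨ name = "impression_date") := by
            rcases hm with h1|h1|h1|h1|h1 <;> rw [h1] <;> decide
          rw [if_neg hy, if_pos hm, if_neg hd, if_neg hy, if_pos hm, ih, htail]
          cases pvB_find (ks.zip tail) with
        | some w => rfl
        | none =>
          simp only [String.join, List.foldl_cons]
          rw [pvFoldl_append]
          simp [String.append_assoc]
          try (conv_rhs => rw [pvFoldl_append])
          try simp [String.append_assoc]
        · by_cases hd : name = "date" ∨ name = "dt" ∨ name = "partition_date" ∨ name = "impression_date"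
          · rw [if_neg hy, if_neg hm, if_pos hd, if_pos hd]
          · rw [if_neg hy, if_neg hm, if_neg hd, if_neg hd, if_neg hm, if_neg hy, ih, htail]

-- ===== VERDICT (by name: the statement is the Claim_ definition above) =====
theorem extract_partition_date_spec : Claim_equal_extract_partition_date := by
  intro ks vs _ _
  unfold Spec_extract_partition_date extract_partition_date extract_partition_date_alt
  rw [pvA_loop_eq]
  simp
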